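-- pv_equiv track=rewrite | github.com/eggnee/Algorithm | 프로그래머스/1/42840. 모의고사/모의고사.py | solution
-- ===== SOURCE A (Python) =====
-- def solution(answers):
--     supos = [[1, 2, 3, 4, 5],
--                [2, 1, 2, 3, 2, 4, 2, 5],
--                [3, 3, 1, 1, 2, 2, 4, 4, 5, 5]
--               ]
--
--     scores = []
--     for i in range(3):
--         score = 0
--         k = 0
--         for j in range(len(answers)):
--             if answers[j] == supos[i][k]:
--                 score += 1
--             k += 1
--             if k == len(supos[i]):
--                 k = 0
--         scores.append(score)
--
--     answer = []
--     for i in range(len(scores)):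
--         if scores[i] == max(scores):
--             answer.append(i+1)
--     return answer
-- ===== SOURCE B (Python) =====
-- def solution(answers):
--     pats = [[1, 2, 3, 4, 5],
--             [2, 1, 2, 3, 2, 4, 2, 5],
--             [3, 3, 1, 1, 2, 2, 4, 4, 5, 5]]
--     # Histogram approach: the three predictions at index j depend only on
--     # j mod 40 (lcm of the pattern lengths), so bucket the answers by
--     # (j mod 40, value) once, then read each score off the histogram
--     # with 40 lookups per pattern.
--     hits = {}
--     for j, a in enumerate(answers):
--         key = (j % 40, a)
--         hits[key] = hits.get(key, 0) + 1
--     scores = [sum(hits.get((r, p[r % len(p)]), 0) for r in range(40)) for p in pats]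
--     best = max(scores)
--     return [i for i, s in enumerate(scores, 1) if s == best]
-- ===== Notes on version B (the rewrite author's own statement) =====
-- stated objective: alternative
-- what changed: Replaces A's per-pattern scanning of answers (a manually wrapped cursor per pattern) by a histogram: one pass buckets the answers by (index mod 40, value) into a dict -- 40 is the lcm of the three pattern lengths, so each pattern's predictions are a function of index mod 40 -- and each score is then read off the histogram with 40 lookups instead of a scan of answers.
import Mathlib
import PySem

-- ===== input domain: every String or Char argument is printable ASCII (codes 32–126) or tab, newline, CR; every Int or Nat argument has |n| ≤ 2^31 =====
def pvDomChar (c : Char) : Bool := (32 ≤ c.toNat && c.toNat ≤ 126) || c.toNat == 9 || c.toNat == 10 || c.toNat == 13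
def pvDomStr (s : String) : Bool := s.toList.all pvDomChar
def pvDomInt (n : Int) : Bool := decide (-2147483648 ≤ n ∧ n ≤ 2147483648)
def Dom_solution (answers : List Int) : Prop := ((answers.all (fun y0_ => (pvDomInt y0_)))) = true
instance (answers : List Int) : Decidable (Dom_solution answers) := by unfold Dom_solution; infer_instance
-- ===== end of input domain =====

-- B buckets the answers once into a histogram keyed by (index mod 40, value) — 40 = lcm of the
-- three pattern lengths — and reads each pattern's score off the histogram with 40 lookups,
-- instead of A's per-pattern pass comparing every answer against a manually wrapped cursor.


-- ===== PORT A =====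
-- inner loop of A for one pattern p: state (score, k); k wraps manually at len(p).
-- supos[i][k] is ported with pyGet? (k is always in range, so the .getD 0 is never taken).
def stepA (p : List Int) (st : Int × Int) (a : Int) : Int × Int :=
  ((if a = (PySem.List.pyGet? p st.2).getD 0 then st.1 + 1 else st.1),
   (if st.2 + 1 = (p.length : Int) then 0 else st.2 + 1))

def scoreLoopA (p : List Int) (answers : List Int) (st : Int × Int) : Int × Int :=
  answers.foldl (stepA p) st

def solution (answers : List Int) : List Int :=
  let supos : List (List Int) :=
    [[1, 2, 3, 4, 5], [2, 1, 2, 3, 2, 4, 2, 5], [3, 3, 1, 1, 2, 2, 4, 4, 5, 5]]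
  let scores := supos.foldl (fun acc p => acc ++ [(scoreLoopA p answers (0, 0)).1]) []
  (PySem.List.pyRange 0 (scores.length : Int) 1).foldl
    (fun acc i =>
      if PySem.List.pyGetD scores i 0 = (PySem.List.max? scores (fun y => y)).getD 0
      then acc ++ [i + 1] else acc)
    []

-- ===== PORT B =====
def solution_alt (answers : List Int) : List Int :=
  let pats : List (List Int) :=
    [[1, 2, 3, 4, 5], [2, 1, 2, 3, 2, 4, 2, 5], [3, 3, 1, 1, 2, 2, 4, 4, 5, 5]]
  let hits := (PySem.List.enumerate answers).foldl
    (fun (d : PySem.Dict (Int × Int) Int) ja =>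
      d.insert (ja.1 % 40, ja.2) (d.getD (ja.1 % 40, ja.2) 0 + 1))
    PySem.Dict.empty
  let scores := pats.map (fun p =>
    (PySem.List.pyRange 0 40 1).foldl
      (fun s r => s + hits.getD (r, PySem.List.pyGetD p (r % (p.length : Int)) 0) 0) 0)
  let best := (PySem.List.max? scores (fun y => y)).getD 0
  (PySem.List.enumerate scores 1).filterMap (fun x => if x.2 = best then some x.1 else none)

-- ===== PRECONDITION & SPEC =====
def Spec_solution (answers : List Int) (out : List Int) : Prop := out = solution_alt answers
instance (answers : List Int) (out : List Int) : Decidable (Spec_solution answers out) := by unfold Spec_solution; infer_instance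

-- ===== CLAIM (what is proved, stated in full; the proofs are below) =====
def Claim_equal_solution : Prop := ∀ (answers : List Int), Dom_solution answers → Spec_solution answers (solution answers)

-- ===== LEMMAS AND PROOFS =====

-- the per-pattern match count, written as structural recursion for the proofs
def cnt (p : List Int) : List Int → Nat → Int → Int
  | [], _, s => s
  | a :: r, j, s => cnt p r (j + 1) (if a = p.getD (j % p.length) 0 then s + 1 else s)

lemma cnt_acc (p : List Int) :
    ∀ (l : List Int) (j : Nat) (s : Int), cnt p l j s = s + cnt p l j 0 := by
  intro l
  induction l with
  | nil => intro j s; simp [cnt]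
  | cons a r ih =>
    intro j s
    simp only [cnt]
    rw [ih, ih (j + 1) (if a = p.getD (j % p.length) 0 then (0:Int) + 1 else 0)]
    split <;> ring

lemma scoreLoopA_eq_cnt (p : List Int) (hL : 1 < p.length) :
    ∀ (answers : List Int) (j : Nat) (s : Int),
      (scoreLoopA p answers (s, ((j % p.length : Nat) : Int))).1 = cnt p answers j s := by
  intro answers
  induction answers with
  | nil => intro j s; rfl
  | cons a r ih =>
    intro j s
    have hjL : j % p.length < p.length := Nat.mod_lt _ (by omega)
    have hget : (PySem.List.pyGet? p ((j % p.length : Nat) : Int)).getD 0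
        = p.getD (j % p.length) 0 := by
      rw [PySem.List.pyGet?_natCast, List.getElem?_eq_getElem hjL,
        List.getD_eq_getElem?_getD, List.getElem?_eq_getElem hjL]
    have hnext : (if ((j % p.length : Nat) : Int) + 1 = (p.length : Int) then (0 : Int)
        else ((j % p.length : Nat) : Int) + 1) = (((j + 1) % p.length : Nat) : Int) := by
      have hm : (j + 1) % p.length = (j % p.length + 1) % p.length := by
        conv_lhs => rw [Nat.add_mod]
        rw [Nat.mod_eq_of_lt hL]
      by_cases h : j % p.length + 1 = p.length
      · have h0 : (j + 1) % p.length = 0 := by rw [hm, h, Nat.mod_self]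
        have hc : ((j % p.length : Nat) : Int) + 1 = (p.length : Int) := by omega
        simp [h0]
        intro hc2
        exact absurd (by rw [← Int.natCast_mod]; exact hc) hc2
      · have hlt : j % p.length + 1 < p.length := by omega
        have h1 : (j + 1) % p.length = j % p.length + 1 := by
          rw [hm, Nat.mod_eq_of_lt hlt]
        rw [h1]
        push_cast
        split
        · omega
        · ring
    simp only [scoreLoopA, List.foldl_cons] at *
    rw [show stepA p (s, ((j % p.length : Nat) : Int)) a
        = ((if a = (PySem.List.pyGet? p ((j % p.length : Nat) : Int)).getD 0 then s + 1 else s),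
           (if ((j % p.length : Nat) : Int) + 1 = (p.length : Int) then 0
            else ((j % p.length : Nat) : Int) + 1)) from rfl, hget, hnext, ih (j + 1)]
    rfl

-- the keyed list B's histogram counts: (j mod 40, answers[j])
def kl (answers : List Int) (s : Int) : List (Int × Int) :=
  (PySem.List.enumerate answers s).map (fun ja => (ja.1 % 40, ja.2))

lemma kl_cons (a : Int) (r : List Int) (s : Int) :
    kl (a :: r) s = (s % 40, a) :: kl r (s + 1) := by
  simp [kl, PySem.List.enumerate_cons]

-- a sum over a nodup list of "count 1 when (r0, a) equals (r, g r)" collapses to the r = r0 term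
lemma sum_ite_pair (g : Int → Int) (a r0 : Int) :
    ∀ (L : List Int), L.Nodup → r0 ∈ L →
      (L.map (fun r => if ((r0, a) : Int × Int) = (r, g r) then (1 : Int) else 0)).sum
        = if a = g r0 then 1 else 0 := by
  have zero : ∀ (L : List Int), r0 ∉ L →
      (L.map (fun r => if ((r0, a) : Int × Int) = (r, g r) then (1 : Int) else 0)).sum = 0 := by
    intro L
    induction L with
    | nil => intro _; simp
    | cons x t ih =>
      intro h
      have hx : r0 ≠ x := fun he => h (he ▸ List.mem_cons_self)
      have ht : r0 ∉ t := fun hm => h (List.mem_cons_of_mem _ hm)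
      simp only [List.map_cons, List.sum_cons, ih ht]
      have : ((r0, a) : Int × Int) ≠ (x, g x) := by
        intro he; exact hx (congrArg Prod.fst he)
      simp [this]
  intro L
  induction L with
  | nil => intro _ h; simp at h
  | cons x t ih =>
    intro hnd hmem
    rcases List.mem_cons.mp hmem with he | hm
    · subst he
      have ht : r0 ∉ t := (List.nodup_cons.mp hnd).1
      rw [List.map_cons, List.sum_cons, zero t ht, add_zero]
      simp [Prod.ext_iff]
    · have hx : r0 ≠ x := by
        intro he; subst he; exact (List.nodup_cons.mp hnd).1 hm
      have : ((r0, a) : Int × Int) ≠ (x, g x) := by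
        intro he; exact hx (congrArg Prod.fst he)
      rw [List.map_cons, List.sum_cons, ih (List.nodup_cons.mp hnd).2 hm, if_neg this, zero_add]

-- B's 40 histogram lookups for pattern p add up to A's match count
lemma bsum_eq_cnt (p : List Int) (hdvd : p.length ∣ 40) :
    ∀ (answers : List Int) (s : Nat),
      (PySem.List.pyRange 0 40 1).foldl
        (fun acc r =>
          acc + ((kl answers (s : Int)).count (r, PySem.List.pyGetD p (r % (p.length : Int)) 0) : Int))
        0
      = cnt p answers s 0 := by
  intro answers
  induction answers with
  | nil =>
    intro s
    simp [kl, PySem.List.enumerate_nil, cnt]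
  | cons a r ih =>
    intro s
    have hcount : ∀ (x : Int × Int),
        ((kl (a :: r) (s : Int)).count x : Int)
          = ((kl r ((s : Int) + 1)).count x : Int)
            + (if (((s : Int) % 40, a) : Int × Int) = x then 1 else 0) := by
      intro x
      rw [kl_cons, List.count_cons]
      push_cast
      by_cases h : (((s : Int) % 40, a) : Int × Int) = x <;> simp [h]
    rw [PySem.List.foldl_add]
    simp only [hcount]
    rw [PySem.List.sum_map_add_int]
    have hrest : (List.map
        (fun x => ((kl r ((s : Int) + 1)).count (x, PySem.List.pyGetD p (x % (p.length : Int)) 0) : Int))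
        (PySem.List.pyRange 0 40 1)).sum = cnt p r (s + 1) 0 := by
      have h1 := ih (s + 1)
      rw [PySem.List.foldl_add, zero_add] at h1
      have hc : ((s : Int) + 1) = (((s + 1 : Nat)) : Int) := by push_cast; ring
      rw [hc]
      exact h1
    have hite := sum_ite_pair (fun x => PySem.List.pyGetD p (x % (p.length : Int)) 0) a
      ((s : Int) % 40) (PySem.List.pyRange 0 40 1) (PySem.List.nodup_pyRange_one 0 40)
      (PySem.List.mem_pyRange_one.mpr ⟨Int.emod_nonneg _ (by norm_num), Int.emod_lt_of_pos _ (by norm_num)⟩)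
    rw [hrest, hite]
    beta_reduce
    have hg : PySem.List.pyGetD p (((s : Int) % 40) % (p.length : Int)) 0
        = p.getD (s % p.length) 0 := by
      have h1 : ((s : Int) % 40) % (p.length : Int) = ((s % 40 % p.length : Nat) : Int) := by
        push_cast; ring
      rw [h1, PySem.List.pyGetD_natCast, Nat.mod_mod_of_dvd s hdvd]
    rw [hg]
    rw [show cnt p (a :: r) s 0
        = cnt p r (s + 1) (if a = p.getD (s % p.length) 0 then (0 : Int) + 1 else 0) from rfl,
      cnt_acc p r (s + 1) (if a = p.getD (s % p.length) 0 then (0 : Int) + 1 else 0)]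
    split <;> ring

-- the selection step: both sides pick the 1-based maximal indices of the three scores
lemma select_eq (c1 c2 c3 : Int) :
    (PySem.List.pyRange 0 (([c1, c2, c3] : List Int).length : Int) 1).foldl
      (fun acc i =>
        if PySem.List.pyGetD [c1, c2, c3] i 0
            = (PySem.List.max? [c1, c2, c3] (fun y => y)).getD 0
        then acc ++ [i + 1] else acc)
      []
    = (PySem.List.enumerate ([c1, c2, c3] : List Int) 1).filterMap
        (fun x => if x.2 = (PySem.List.max? ([c1, c2, c3] : List Int) (fun y => y)).getD 0
                  then some x.1 else none) := by
  have hr : PySem.List.pyRange 0 (([c1, c2, c3] : List Int).length : Int) 1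
      = ([0, 1, 2] : List Int) := by
    rw [show (([c1, c2, c3] : List Int).length : Int) = ((3 : Nat) : Int) from rfl]
    decide
  rw [hr]
  simp only [PySem.List.enumerate_cons, PySem.List.enumerate_nil,
    List.foldl_cons, List.foldl_nil, List.filterMap_cons, List.filterMap_nil,
    show PySem.List.pyGetD [c1, c2, c3] 0 0 = c1 from rfl,
    show PySem.List.pyGetD [c1, c2, c3] 1 0 = c2 from rfl,
    show PySem.List.pyGetD [c1, c2, c3] 2 0 = c3 from rfl]
  norm_num
  split_ifs <;> simp

-- ===== VERDICT (by name: the statement is the Claim_ definition above) =====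
theorem solution_spec : Claim_equal_solution := by
  intro answers _
  show solution answers = solution_alt answers
  unfold solution solution_alt
  simp only [List.foldl_cons, List.foldl_nil, List.nil_append, List.cons_append,
    List.map_cons, List.map_nil]
  -- B's histogram lookups are counts of the keyed list
  have hhits : ∀ (v : Int × Int),
      ((PySem.List.enumerate answers 0).foldl
        (fun (d : PySem.Dict (Int × Int) Int) ja =>
          d.insert (ja.1 % 40, ja.2) (d.getD (ja.1 % 40, ja.2) 0 + 1)) PySem.Dict.empty).getD v 0
      = ((kl answers 0).count v : Int) := by
    intro v
    rw [show (PySem.List.enumerate answers 0).foldl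
          (fun (d : PySem.Dict (Int × Int) Int) ja =>
            d.insert (ja.1 % 40, ja.2) (d.getD (ja.1 % 40, ja.2) 0 + 1)) PySem.Dict.empty
        = ((PySem.List.enumerate answers 0).map (fun ja => (ja.1 % 40, ja.2))).foldl
          (fun (d : PySem.Dict (Int × Int) Int) x => d.insert x (d.getD x 0 + 1)) PySem.Dict.empty
      from (@List.foldl_map _ _ _ (fun (ja : Int × Int) => (ja.1 % 40, ja.2))
        (fun (d : PySem.Dict (Int × Int) Int) x => d.insert x (d.getD x 0 + 1))
        (PySem.List.enumerate answers 0) PySem.Dict.empty).symm,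
      PySem.Dict.getD_foldl_insert_add_one, PySem.Dict.getD_empty, zero_add, kl]
  simp only [hhits]
  have hb : ∀ (p : List Int), p.length ∣ 40 →
      (PySem.List.pyRange 0 40 1).foldl
        (fun acc r => acc + ((kl answers 0).count (r, PySem.List.pyGetD p (r % (p.length : Int)) 0) : Int))
        0 = cnt p answers 0 0 := by
    intro p h2
    have := bsum_eq_cnt p h2 answers 0
    simpa using this
  rw [hb [1,2,3,4,5] (by decide), hb [2,1,2,3,2,4,2,5] (by decide),
      hb [3,3,1,1,2,2,4,4,5,5] (by decide)]
  have h1 := scoreLoopA_eq_cnt [1,2,3,4,5] (by decide) answers 0 0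
  have h2 := scoreLoopA_eq_cnt [2,1,2,3,2,4,2,5] (by decide) answers 0 0
  have h3 := scoreLoopA_eq_cnt [3,3,1,1,2,2,4,4,5,5] (by decide) answers 0 0
  simp only [Nat.zero_mod, Nat.cast_zero] at h1 h2 h3
  simp only [h1, h2, h3]
  exact select_eq _ _ _
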